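-- pv_equiv track=rewrite | github.com/amfei/PyProgrms | find_duplicate.py | find_duplicated
-- ===== SOURCE A (Python) =====
-- def find_duplicated(ssn_name_dictionary:dict)->dict:
--     result={}
--     names=list(ssn_name_dictionary.values())
--     for(ssn,name) in ssn_name_dictionary.items():
--         if names.count(name)>1:
--             result[name]=result.get(name,[])
--             result[name].append(ssn)
--     return result
-- ===== SOURCE B (Python) =====
-- def find_duplicated(ssn_name_dictionary: dict) -> dict:
--     items = list(ssn_name_dictionary.items())
--     names = [name for _, name in items]
--     dup_names = [name for i, name in enumerate(names)
--                  if names.index(name) == i and name in names[i + 1:]]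
--     return {name: [ssn for ssn, n in items if n == name] for name in dup_names}
-- ===== Notes on version B (the rewrite author's own statement) =====
-- stated objective: alternative
-- what changed: Inverts the iteration: instead of A's single pass over items that accumulates SSNs into a result dict under a per-item count test, B first computes the duplicated names by a positional first-occurrence test (names.index(name) == i and the name recurs in names[i+1:]) and then gathers each such name's SSNs with a per-name scan over the items; no accumulating dict is maintained.
import Mathlib
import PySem

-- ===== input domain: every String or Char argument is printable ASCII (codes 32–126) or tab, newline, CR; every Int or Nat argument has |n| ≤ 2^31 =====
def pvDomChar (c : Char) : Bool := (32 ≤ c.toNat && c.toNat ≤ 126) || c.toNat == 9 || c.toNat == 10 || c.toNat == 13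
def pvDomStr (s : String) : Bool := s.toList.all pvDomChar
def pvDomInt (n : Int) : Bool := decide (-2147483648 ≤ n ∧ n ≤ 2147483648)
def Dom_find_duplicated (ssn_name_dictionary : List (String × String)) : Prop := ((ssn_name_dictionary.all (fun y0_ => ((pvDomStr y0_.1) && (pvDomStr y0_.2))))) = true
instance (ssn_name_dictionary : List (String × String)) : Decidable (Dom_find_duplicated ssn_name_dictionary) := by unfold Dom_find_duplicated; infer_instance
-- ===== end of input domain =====

-- B inverts the iteration: it first selects the duplicated names by a positional
-- first-occurrence test (names.index(name) == i and name recurs in names[i+1:]),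
-- then gathers each such name's SSNs with a per-name scan (objective: alternative).

-- ===== PORT A =====
def find_duplicated (ssn_name_dictionary : List (String × String)) : List (String × List String) :=
  let names := ssn_name_dictionary.map Prod.snd
  (ssn_name_dictionary.foldl
    (fun (result : PySem.Dict String (List String)) p =>
      if names.count p.2 > 1 then
        -- result[name] = result.get(name, []); result[name].append(ssn)
        result.insert p.2 (result.getD p.2 [] ++ [p.1])
      else result)
    PySem.Dict.empty).items

-- ===== PORT B =====
def find_duplicated_alt (ssn_name_dictionary : List (String × String)) : List (String × List String) :=
  let items := ssn_name_dictionary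
  let names := items.map (fun p => p.2)
  -- [name for i, name in enumerate(names) if names.index(name) == i and name in names[i+1:]]
  let dup_names := ((PySem.List.enumerate names).filter
      (fun q => ((PySem.List.index? names q.2).map Int.ofNat == some q.1) &&
        (PySem.List.slice names (some (q.1 + 1)) none).contains q.2)).map (fun q => q.2)
  -- {name: [ssn for ssn, n in items if n == name] for name in dup_names}
  (dup_names.foldl
    (fun (d : PySem.Dict String (List String)) name =>
      d.insert name ((items.filter (fun p => p.2 == name)).map (fun p => p.1)))
    PySem.Dict.empty).items

-- ===== PRECONDITION & SPEC =====
def Spec_find_duplicated (ssn_name_dictionary : List (String × String)) (out : List (String × List String)) : Prop := out = find_duplicated_alt ssn_name_dictionary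
instance (ssn_name_dictionary : List (String × String)) (out : List (String × List String)) : Decidable (Spec_find_duplicated ssn_name_dictionary out) := by unfold Spec_find_duplicated; infer_instance

-- ===== CLAIM (what is proved, stated in full; the proofs are below) =====
def Claim_equal_find_duplicated : Prop := ∀ (ssn_name_dictionary : List (String × String)), Dom_find_duplicated ssn_name_dictionary → Spec_find_duplicated ssn_name_dictionary (find_duplicated ssn_name_dictionary)

-- ===== LEMMAS AND PROOFS =====

-- the SSNs grouped under name c by A's insert fold
theorem getD_ifold (l : List (String × String)) (g : PySem.Dict String (List String)) (c : String) :
    (l.foldl (fun g p => g.insert p.2 (g.getD p.2 [] ++ [p.1])) g).getD c []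
      = g.getD c [] ++ (l.filter (fun p => p.2 == c)).map Prod.fst := by
  induction l generalizing g with
  | nil => simp
  | cons p t ih =>
    simp only [List.foldl_cons, ih, List.filter_cons]
    rw [PySem.Dict.getD_insert]
    by_cases h : c = p.2
    · simp [h]
    · simp [h, Ne.symm h]

-- set(xs) commutes with filtering
theorem discard_filter (q : String → Bool) (s : PySem.Set String) (x : String) :
    (PySem.Set.discard s x).filter q = PySem.Set.discard (s.filter q) x := by
  simp [PySem.Set.discard, List.filter_filter, Bool.and_comm]

theorem discard_filter_not (q : String → Bool) (s : PySem.Set String) (x : String) (hx : q x = false) :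
    (PySem.Set.discard s x).filter q = s.filter q := by
  simp only [PySem.Set.discard]
  rw [List.filter_filter]
  apply List.filter_congr
  intro a _
  by_cases h : a = x
  · simp [h, hx]
  · simp [h]

theorem ofList_filter (q : String → Bool) (xs : List String) :
    PySem.Set.ofList (xs.filter q) = (PySem.Set.ofList xs).filter q := by
  induction xs with
  | nil => simp [PySem.Set.ofList_nil]
  | cons x t ih =>
    rw [List.filter_cons, PySem.Set.ofList_cons]
    by_cases h : q x
    · simp only [if_pos, PySem.Set.ofList_cons, List.filter_cons, h, ih, discard_filter]
    · simp only [Bool.false_eq_true, if_false, List.filter_cons, h, ih]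
      rw [discard_filter_not q _ x (by simpa using h)]

-- the tail of B's first-occurrence scan, rephrased for the extended prefix
theorem dup_tail_eq (pre : List String) (x : String) (t : List String) :
    (PySem.Set.discard (PySem.Set.ofList t) x).filter
        (fun n => !(pre.contains n) && decide (1 < (x :: t).count n))
      = (PySem.Set.ofList t).filter
        (fun n => !((pre ++ [x]).contains n) && decide (1 < t.count n)) := by
  simp only [PySem.Set.discard]
  rw [List.filter_filter]
  apply List.filter_congr
  intro n _
  by_cases h : n = x
  · simp [h]
  · simp [h, Ne.symm h]

theorem dup_aux (rest pre : List String) :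
    (((PySem.List.enumerate rest (pre.length : Int)).filter
        (fun q => ((PySem.List.index? (pre ++ rest) q.2).map Int.ofNat == some q.1) &&
          (PySem.List.slice (pre ++ rest) (some (q.1 + 1)) none).contains q.2)).map (fun q => q.2))
      = (PySem.Set.ofList rest).filter
          (fun n => !(pre.contains n) && decide (1 < rest.count n)) := by
  induction rest generalizing pre with
  | nil => simp [PySem.List.enumerate_nil, PySem.Set.ofList_nil]
  | cons x t ih =>
    rw [PySem.List.enumerate_cons, List.filter_cons]
    have hsplit : pre ++ x :: t = (pre ++ [x]) ++ t := by simp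
    have hslice : PySem.List.slice (pre ++ x :: t) (some ((pre.length : Int) + 1)) none = t := by
      have h1 : (pre.length : Int) + 1 = ((pre.length + 1 : Nat) : Int) := by push_cast; ring
      rw [h1, PySem.List.slice_from_natCast, hsplit]
      have hlen : pre.length + 1 = (pre ++ [x]).length := by simp
      rw [hlen, List.drop_left]
    have htail :
        ((PySem.List.enumerate t ((pre.length : Int) + 1)).filter
          (fun q => ((PySem.List.index? (pre ++ x :: t) q.2).map Int.ofNat == some q.1) &&
            (PySem.List.slice (pre ++ x :: t) (some (q.1 + 1)) none).contains q.2)).map (fun q => q.2)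
        = (PySem.Set.ofList t).filter
            (fun n => !((pre ++ [x]).contains n) && decide (1 < t.count n)) := by
      have hl : (pre.length : Int) + 1 = ((pre ++ [x]).length : Int) := by simp
      rw [hl, hsplit]
      exact ih (pre ++ [x])
    by_cases hx : x ∈ pre
    · -- x seen before: index(x) < len(pre), head dropped
      have hidx : PySem.List.index? (pre ++ x :: t) x = PySem.List.index? pre x :=
        PySem.List.index?_append_of_mem _ hx
      obtain ⟨k, hk⟩ := Option.isSome_iff_exists.mp ((PySem.List.index?_isSome_iff _ _).mpr hx)
      obtain ⟨hklt, -, -⟩ := PySem.List.getElem_of_index?_eq_some (hidx ▸ hk : PySem.List.index? pre x = some k)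
      rw [if_neg (by
        simp only [hidx, hk, Option.map_some, Bool.and_eq_true, beq_iff_eq, Option.some.injEq, Int.ofNat_eq_natCast]
        intro h
        omega)]
      rw [htail, PySem.Set.ofList_cons, List.filter_cons, if_neg (by simp [hx])]
      exact (dup_tail_eq pre x t).symm
    · -- first global occurrence of x
      have hidx : PySem.List.index? (pre ++ x :: t) x = some pre.length := by
        rw [PySem.List.index?_eq_some_iff]
        exact ⟨pre, t, rfl, rfl, hx⟩
      by_cases hmem : x ∈ t
      · rw [if_pos (by
            simp only [hidx, Option.map_some, hslice, Bool.and_eq_true, beq_iff_eq]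
            exact ⟨rfl, by simpa using hmem⟩)]
        rw [List.map_cons, htail, PySem.Set.ofList_cons, List.filter_cons, if_pos (by simp [hx, hmem])]
        exact congrArg (x :: ·) (dup_tail_eq pre x t).symm
      · rw [if_neg (by
            simp only [hidx, Option.map_some, hslice, Bool.and_eq_true, beq_iff_eq, not_and]
            intro _; simpa using hmem)]
        rw [htail, PySem.Set.ofList_cons, List.filter_cons, if_neg (by simp [hmem])]
        exact (dup_tail_eq pre x t).symm

-- ===== VERDICT (by name: the statement is the Claim_ definition above) =====
theorem find_duplicated_spec : Claim_equal_find_duplicated := by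
  intro l _
  unfold Spec_find_duplicated find_duplicated find_duplicated_alt
  simp only []
  -- B's duplicated-name list is the count>1 filter of the first-occurrence dedup
  have hdup :
      ((PySem.List.enumerate (l.map (fun p => p.2)) 0).filter
        (fun q => ((PySem.List.index? (l.map (fun p => p.2)) q.2).map Int.ofNat == some q.1) &&
          (PySem.List.slice (l.map (fun p => p.2)) (some (q.1 + 1)) none).contains q.2)).map (fun q => q.2)
      = (PySem.Set.ofList (l.map Prod.snd)).filter
          (fun n => decide (1 < (l.map Prod.snd).count n)) := by
    have h0 := dup_aux (l.map (fun p => p.2)) []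
    simp only [List.length_nil, Nat.cast_zero, List.nil_append, List.contains_nil,
      Bool.not_false, Bool.true_and] at h0
    exact h0
  rw [hdup]
  -- A's loop keeps exactly the items whose name has count > 1
  rw [PySem.List.foldl_ite_eq_foldl_filter
        (p := fun p : String × String => (l.map Prod.snd).count p.2 > 1)
        (f := fun (r : PySem.Dict String (List String)) p =>
          r.insert p.2 (r.getD p.2 [] ++ [p.1]))]
  have hAnd : ((l.filter (fun p => decide ((l.map Prod.snd).count p.2 > 1))).foldl
      (fun (r : PySem.Dict String (List String)) p =>
        r.insert p.2 (r.getD p.2 [] ++ [p.1])) PySem.Dict.empty).keys.Nodup := by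
    exact PySem.Dict.nodup_keys_foldl_insert_key _ Prod.snd _ _ PySem.Dict.nodup_keys_empty
  rw [PySem.Dict.items_eq_map_keys _ hAnd []]
  rw [PySem.Dict.keys_foldl_insert_key]
  simp only [getD_ifold, PySem.Dict.getD_empty, PySem.Dict.keys_empty,
    PySem.Set.update_nil_left, List.nil_append]
  -- B's comprehension dict: fresh distinct keys, so its items are exactly the mapped list
  rw [PySem.Dict.items_foldl_insert_fresh _ (fun k => k)
        (fun k => (l.filter (fun p => p.2 == k)).map (fun p => p.1)) PySem.Dict.empty ?hc ?hn]
  case hc => intro a _; exact PySem.Dict.contains_empty _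
  case hn =>
    rw [List.map_id_fun']
    exact (PySem.Set.nodup_ofList _).filter _
  show _ = [] ++ _
  rw [List.nil_append]
  -- identical key lists
  have hkeys : PySem.Set.ofList (List.map Prod.snd
      (List.filter (fun p => decide (List.count p.2 (List.map Prod.snd l) > 1)) l))
      = (PySem.Set.ofList (List.map Prod.snd l)).filter
          (fun n => decide (List.count n (List.map Prod.snd l) > 1)) := by
    rw [show (fun p : String × String => decide (List.count p.2 (List.map Prod.snd l) > 1))
        = ((fun n => decide (List.count n (List.map Prod.snd l) > 1)) ∘ Prod.snd) from rfl,
      ← List.filter_map, ofList_filter]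
  rw [hkeys]
  -- identical values under each kept key
  apply List.map_congr_left
  intro k hk
  rw [List.mem_filter] at hk
  have hcnt : 1 < List.count k (l.map Prod.snd) := by simpa using hk.2
  rw [List.filter_filter]
  have hfe : List.filter (fun a : String × String =>
        a.2 == k && decide (List.count a.2 (List.map Prod.snd l) > 1)) l
      = List.filter (fun p : String × String => p.2 == k) l := by
    apply List.filter_congr
    intro p _
    by_cases h : p.2 = k
    · simp [h, hcnt]
    · simp [h]
  rw [hfe]
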